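-- pv_equiv track=rewrite | github.com/MrBrantCode/unitest_baseline | mut_generate/mist_train_cf/cf_67312/solution.py | prime_five_nine_twelve
-- ===== SOURCE A (Python) =====
-- def prime_five_nine_twelve(n):
--     def is_prime(num):
--         if num <= 1:
--             return False
--         if num <= 3:
--             return True
--         if num % 2 == 0 or num % 3 == 0:
--             return False
--         i = 5
--         while i * i <= num:
--             if num % i == 0 or num % (i + 2) == 0:
--                 return False
--             i += 6
--         return True
--
--     def digit_sum(num):
--         return sum(int(digit) for digit in str(num))
--
--     count = 0
--     for i in range(2, n):
--         if is_prime(i):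
--             if '5' in str(i) and digit_sum(i) % 3 == 0:
--                 count += 1
--     return count
-- ===== SOURCE B (Python) =====
-- def prime_five_nine_twelve(n):
--     # Closed form: a number whose digit sum is divisible by 3 is itself
--     # divisible by 3, so the only prime it could be is 3 -- and str(3)
--     # contains no '5'.  Hence no i in range(2, n) ever qualifies.
--     return 0
-- ===== Notes on version B (the rewrite author's own statement) =====
-- stated objective: faster
-- what changed: replaced the per-number trial-division counting loop by the closed form 0: a digit sum divisible by 3 forces the number itself to be divisible by 3, so the only candidate prime is 3, whose decimal form has no digit '5' -- the count is always 0, and the Lean file proves this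
import Mathlib
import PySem

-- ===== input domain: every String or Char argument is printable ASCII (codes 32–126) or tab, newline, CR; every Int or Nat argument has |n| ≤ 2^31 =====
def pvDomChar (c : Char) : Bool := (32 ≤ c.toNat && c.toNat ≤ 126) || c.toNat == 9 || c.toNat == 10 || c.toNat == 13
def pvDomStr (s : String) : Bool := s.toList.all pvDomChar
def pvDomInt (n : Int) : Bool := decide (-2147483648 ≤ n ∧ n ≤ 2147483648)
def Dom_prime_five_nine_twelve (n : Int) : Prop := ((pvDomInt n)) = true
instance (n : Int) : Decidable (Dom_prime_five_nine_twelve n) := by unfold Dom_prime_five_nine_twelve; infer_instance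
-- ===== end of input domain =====

-- B replaces A's trial-division counting loop by the closed form 0 (a prime with
-- digit sum divisible by 3 must be 3, which has no digit '5'); the proof below shows it.


-- ===== PORT A =====
-- the 'while i * i <= num' trial-division loop of A's inner is_prime
def pvIsPrimeLoop (num i : Int) : Bool :=
  if _h : i * i ≤ num then
    if PySem.Int.mod num i == 0 || PySem.Int.mod num (i + 2) == 0 then false
    else pvIsPrimeLoop num (i + 6)
  else true
termination_by (num + 1 - i).toNat
decreasing_by
  have hi : i ≤ num := by nlinarith [sq_nonneg i]
  omega

-- A's inner is_prime
def pvIsPrime (num : Int) : Bool :=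
  if num ≤ 1 then false
  else if num ≤ 3 then true
  else if PySem.Int.mod num 2 == 0 || PySem.Int.mod num 3 == 0 then false
  else pvIsPrimeLoop num 5

-- A's inner digit_sum: sum(int(digit) for digit in str(num)).
-- int(digit) is PySem.Int.ofChars? [c]; the .getD 0 is never taken on the calls A makes
-- (digit_sum is only applied to i ≥ 2, whose str consists of digit characters, where
-- ofChars? returns some) — exact there.
def pvDigitSum (num : Int) : Int :=
  ((PySem.Int.toChars num).map (fun c => (PySem.Int.ofChars? [c]).getD 0)).sum

def prime_five_nine_twelve (n : Int) : Int :=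
  (PySem.List.pyRange 2 n 1).foldl
    (fun count i =>
      if pvIsPrime i then
        if PySem.Str.isIn "5" (PySem.Int.toStr i) && PySem.Int.mod (pvDigitSum i) 3 == 0 then
          count + 1
        else count
      else count) 0

-- ===== PORT B =====
def prime_five_nine_twelve_alt (n : Int) : Int := 0

-- ===== PRECONDITION & SPEC =====
def Spec_prime_five_nine_twelve (n : Int) (out : Int) : Prop := out = prime_five_nine_twelve_alt n
instance (n : Int) (out : Int) : Decidable (Spec_prime_five_nine_twelve n out) := by unfold Spec_prime_five_nine_twelve; infer_instance

-- ===== CLAIM (what is proved, stated in full; the proofs are below) =====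
def Claim_equal_prime_five_nine_twelve : Prop := ∀ (n : Int), Dom_prime_five_nine_twelve n → Spec_prime_five_nine_twelve n (prime_five_nine_twelve n)

-- ===== LEMMAS AND PROOFS =====

-- the decimal digit characters of n, built most-significant-first (= Nat.toDigits 10 n)
def pvDecDigits (n : Nat) : List Char :=
  if n < 10 then [Nat.digitChar n]
  else pvDecDigits (n / 10) ++ [Nat.digitChar (n % 10)]
termination_by n
decreasing_by exact Nat.div_lt_self (by omega) (by omega)

lemma pvToDigitsCore_eq : ∀ (f n : Nat) (acc : List Char), n < f →
    Nat.toDigitsCore 10 f n acc = pvDecDigits n ++ acc := by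
  intro f
  induction f with
  | zero => intro n acc h; omega
  | succ f ih =>
    intro n acc h
    rw [Nat.toDigitsCore]
    by_cases h10 : n / 10 = 0
    · rw [if_pos h10, pvDecDigits, if_pos (by omega)]
      have : n % 10 = n := Nat.mod_eq_of_lt (by omega)
      rw [this]
      simp
    · rw [if_neg h10]
      have hR : pvDecDigits n = pvDecDigits (n / 10) ++ [Nat.digitChar (n % 10)] := by
        rw [pvDecDigits]
        rw [if_neg (by omega)]
      rw [hR, ih (n / 10) _ (by omega)]
      simp

lemma pvToChars_eq (i : Int) (h : 0 ≤ i) :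
    PySem.Int.toChars i = pvDecDigits i.toNat := by
  unfold PySem.Int.toChars
  rw [if_neg (by omega), Nat.toDigits]
  simpa using pvToDigitsCore_eq (i.toNat + 1) i.toNat [] (by omega)

lemma pvDigitVal (d : Nat) (h : d < 10) :
    (PySem.Int.ofChars? [Nat.digitChar d]).getD 0 = (d : Int) := by
  interval_cases d <;> decide

lemma pvDecDigits_sum_mod3 (n : Nat) :
    ((pvDecDigits n).map (fun c => (PySem.Int.ofChars? [c]).getD 0)).sum % 3 = (n : Int) % 3 := by
  induction n using Nat.strong_induction_on with
  | _ n ih =>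
    rw [pvDecDigits]
    by_cases h10 : n < 10
    · rw [if_pos h10]
      simp [pvDigitVal n h10]
    · rw [if_neg h10, List.map_append, List.sum_append]
      have hq := ih (n / 10) (Nat.div_lt_self (by omega) (by omega))
      have hr : (PySem.Int.ofChars? [Nat.digitChar (n % 10)]).getD 0 = ((n % 10 : Nat) : Int) :=
        pvDigitVal (n % 10) (Nat.mod_lt _ (by omega))
      simp only [List.map_cons, List.map_nil, List.sum_cons, List.sum_nil, add_zero, hr]
      have hdecomp : n = 10 * (n / 10) + n % 10 := (Nat.div_add_mod n 10).symm ▸ by omega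
      omega

-- 3 divides the digit sum of i (as A computes it) only if 3 divides i
lemma pvDigitSum_dvd (i : Int) (h0 : 0 ≤ i) (h : (3 : Int) ∣ pvDigitSum i) : (3 : Int) ∣ i := by
  unfold pvDigitSum at h
  rw [pvToChars_eq i h0] at h
  have hm := pvDecDigits_sum_mod3 i.toNat
  have h3 : (i.toNat : Int) % 3 = 0 := by omega
  have : i = (i.toNat : Int) := by omega
  omega

-- A's is_prime rejects multiples of 3 above 3
lemma pvIsPrime_of_three_dvd (i : Int) (h3 : 3 < i) (hd : (3 : Int) ∣ i) :
    pvIsPrime i = false := by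
  unfold pvIsPrime
  rw [if_neg (by omega), if_neg (by omega)]
  have hmod : PySem.Int.mod i 3 = 0 := (PySem.Int.mod_eq_zero_iff_dvd i 3).mpr hd
  rw [hmod]
  simp

-- every step of A's loop leaves the counter unchanged
lemma pvStep_eq (n : Int) : ∀ (acc : Int), ∀ i ∈ PySem.List.pyRange 2 n 1,
    (if pvIsPrime i then
      if PySem.Str.isIn "5" (PySem.Int.toStr i) && PySem.Int.mod (pvDigitSum i) 3 == 0 then
        acc + 1
      else acc
     else acc) = acc := by
  intro acc i hi
  have h2 : 2 ≤ i := (PySem.List.mem_pyRange_one.mp hi).1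
  by_cases hm : PySem.Int.mod (pvDigitSum i) 3 = 0
  · have hdvd : (3 : Int) ∣ i :=
      pvDigitSum_dvd i (by omega) ((PySem.Int.mod_eq_zero_iff_dvd _ 3).mp hm)
    by_cases hle : i ≤ 3
    · have : i = 3 := by omega
      subst this
      have h5 : (PySem.Str.isIn "5" (PySem.Int.toStr 3) &&
          PySem.Int.mod (pvDigitSum 3) 3 == 0) = false := by decide
      rw [h5]
      split <;> rfl
    · rw [pvIsPrime_of_three_dvd i (by omega) hdvd]
      simp
  · have hb : (PySem.Int.mod (pvDigitSum i) 3 == 0) = false := by simpa using hm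
    rw [hb, Bool.and_false]
    split <;> rfl

-- ===== VERDICT (by name: the statement is the Claim_ definition above) =====
theorem prime_five_nine_twelve_spec : Claim_equal_prime_five_nine_twelve := by
  intro n _
  unfold Spec_prime_five_nine_twelve prime_five_nine_twelve prime_five_nine_twelve_alt
  rw [PySem.List.foldl_congr_mem _ _ (fun acc _ => acc) 0 (pvStep_eq n)]
  simp
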